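-- pv_equiv track=rewrite | github.com/svott03/Algorithms | Blossom/solve.py | loop
-- ===== SOURCE A (Python) =====
-- def loop(x,y):
--     if (x > y):
--         x,y = y,x
--     vis = [[False]*(3*y) for i in range(3*y)]
--     while (x != y):
--         if (vis[x][y]):
--             return True
--         vis[x][y] = True
--         y -= x
--         x += x
--         if (x > y):
--             x,y = y,x
--     return False
-- ===== SOURCE B (Python) =====
-- def loop(x, y):
--     # Pigeonhole bound instead of a visited structure: with the invariant sum
--     # s = x+y, the tracked value x always lies in {0..s//2}, so if equality is
--     # not reached within s//2 + 2 steps a state must have repeated and the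
--     # process cycles forever. O(1) memory, no (3y)x(3y) matrix.
--     if x == y:
--         return False
--     if x > y:
--         x, y = y, x
--     s = x + y
--     budget = s // 2 + 2
--     while budget > 0:
--         if 2 * x == s:
--             return False
--         x = min(2 * x, s - 2 * x)
--         budget -= 1
--     return True
-- ===== Notes on version B (the rewrite author's own statement) =====
-- stated objective: faster
-- what changed: B replaces A's visited-state cycle detection on a (3y)x(3y) boolean matrix by a memoryless pigeonhole step budget: with the invariant sum s=x+y the tracked value stays in {0..s//2}, so equality is reached within s//2+2 steps or never.
import Mathlib
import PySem

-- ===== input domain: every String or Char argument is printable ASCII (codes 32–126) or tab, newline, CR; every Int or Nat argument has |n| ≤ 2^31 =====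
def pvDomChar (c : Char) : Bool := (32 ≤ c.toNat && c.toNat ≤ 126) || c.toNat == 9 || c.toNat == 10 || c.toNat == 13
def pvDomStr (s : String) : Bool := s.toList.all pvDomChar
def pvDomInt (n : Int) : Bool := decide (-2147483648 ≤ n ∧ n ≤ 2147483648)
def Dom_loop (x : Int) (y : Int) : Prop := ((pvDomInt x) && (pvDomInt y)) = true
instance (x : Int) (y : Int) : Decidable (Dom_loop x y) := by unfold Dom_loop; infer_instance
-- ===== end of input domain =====

-- B replaces A's (3y)×(3y) visited matrix by a memoryless pigeonhole step budget
-- (x stays in {0..s//2} under the invariant sum s = x+y), faster: O(y) time, O(1) memory.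

-- ===== PORT A =====
-- Python list index with negative wrap: some (normalized index) iff -n ≤ i < n, none = IndexError.
def pyIdx2 (n : Int) (i : Int) : Option Int :=
  if 0 ≤ i ∧ i < n then some i
  else if -n ≤ i ∧ i < 0 then some (i + n) else none

-- the while-loop of A; vis is the set of marked (i,j) cells of the 2D matrix (normalized indices);
-- fuel is a totality device only (sufficient on Pre_); none = IndexError / fuel exhausted.
def loopAuxA (fuel : Nat) (n : Int) (vis : List (Int × Int)) (x : Int) (y : Int) : Option Bool :=
  match fuel with
  | 0 => none
  | Nat.succ fuel =>
    if x = y then some false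
    else
      match pyIdx2 n x, pyIdx2 n y with
      | some i, some j =>
          if (i, j) ∈ vis then some true
          else
            let y' := y - x
            let x' := x + x
            if x' > y' then loopAuxA fuel n ((i, j) :: vis) y' x'
            else loopAuxA fuel n ((i, j) :: vis) x' y'
      | _, _ => none

def loop (x : Int) (y : Int) : Bool :=
  let p := if x > y then (y, x) else (x, y)
  match loopAuxA (p.1.natAbs + p.2.natAbs + 2) (3 * p.2) [] p.1 p.2 with
  | some b => b
  | none => false

-- ===== PORT B =====
-- the while-loop of B: budget counts down, no visited structure at all.
def loopAuxB : Nat → Int → Int → Bool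
  | 0, _, _ => true
  | Nat.succ budget, s, x =>
    if 2 * x = s then false else loopAuxB budget s (min (2 * x) (s - 2 * x))

def loop_alt (x : Int) (y : Int) : Bool :=
  if x = y then false
  else
    let p := if x > y then (y, x) else (x, y)
    let s := p.1 + p.2
    loopAuxB (PySem.Int.floordiv s 2 + 2).toNat s p.1

-- ===== PRECONDITION & SPEC =====
-- Pre_ excludes exactly the inputs where A raises IndexError: x ≠ y with a negative argument
-- (the doubled negative coordinate eventually leaves the matrix).
def Pre_loop (x : Int) (y : Int) : Prop := x = y ∨ (0 ≤ x ∧ 0 ≤ y)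
instance (x : Int) (y : Int) : Decidable (Pre_loop x y) := by unfold Pre_loop; infer_instance
def pvWitness_loop : Int × Int := (3, 5)
def Spec_loop (x : Int) (y : Int) (out : Bool) : Prop := out = loop_alt x y
instance (x : Int) (y : Int) (out : Bool) : Decidable (Spec_loop x y out) := by unfold Spec_loop; infer_instance

-- ===== CLAIM (what is proved, stated in full; the proofs are below) =====
def Claim_equal_loop : Prop := ∀ (x : Int) (y : Int), Dom_loop x y → Pre_loop x y → Spec_loop x y (loop x y)

-- ===== LEMMAS AND PROOFS =====

-- the common step function, and a proof-side 1D view of A's loop (seen = set of visited x-values)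
def fstep (s x : Int) : Int := min (2 * x) (s - 2 * x)

def auxSeen (fuel : Nat) (s : Int) (seen : List Int) (x : Int) : Bool :=
  match fuel with
  | 0 => false
  | Nat.succ fuel =>
    if 2 * x = s then false
    else if x ∈ seen then true
    else auxSeen fuel s (x :: seen) (fstep s x)

-- lockstep invariant: A's visited cells are exactly {(u, s-u) | u ∈ seen} and A's 2D loop equals the 1D view
lemma lockstep (fuel : Nat) (s n : Int) (hn : s < n) :
    ∀ (x : Int) (seen : List Int), 0 ≤ x → 2 * x ≤ s →
      (loopAuxA fuel n (seen.map (fun u => (u, s - u))) x (s - x)).getD false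
        = auxSeen fuel s seen x := by
  induction fuel with
  | zero => intro x seen _ _; simp [loopAuxA, auxSeen]
  | succ fuel ih =>
    intro x seen hx h2x
    by_cases heq : 2 * x = s
    · have : x = s - x := by omega
      simp [loopAuxA, auxSeen, ← this, heq]
    · have hlt : 2 * x < s := lt_of_le_of_ne h2x heq
      have hne : x ≠ s - x := by omega
      have hix : pyIdx2 n x = some x := by unfold pyIdx2; rw [if_pos (by omega)]
      have hiy : pyIdx2 n (s - x) = some (s - x) := by unfold pyIdx2; rw [if_pos (by omega)]
      have hmem : ((x, s - x) ∈ seen.map (fun u => (u, s - u))) ↔ x ∈ seen := by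
        simp [List.mem_map]
      rw [loopAuxA, auxSeen, if_neg hne, if_neg heq, hix, hiy]
      dsimp only
      simp only [hmem]
      by_cases hm : x ∈ seen
      · simp [hm]
      · rw [if_neg hm, if_neg hm]
        have hy' : s - x - x = s - 2 * x := by ring
        have hx' : x + x = 2 * x := by ring
        rw [hy', hx']
        have hcons : ((x, s - x) :: seen.map (fun u => (u, s - u)))
            = (x :: seen).map (fun u => (u, s - u)) := by simp
        by_cases hsw : 2 * x > s - 2 * x
        · rw [if_pos hsw, hcons]
          have hmin : fstep s x = s - 2 * x := by unfold fstep; omega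
          have h2 := ih (s - 2 * x) (x :: seen) (by omega) (by omega)
          rw [show s - (s - 2 * x) = 2 * x by ring] at h2
          rw [hmin]; exact h2
        · rw [if_neg hsw, hcons]
          have hmin : fstep s x = 2 * x := by unfold fstep; omega
          rw [hmin]
          exact ih (2 * x) (x :: seen) (by omega) (by omega)

lemma match_getD (o : Option Bool) :
    (match o with | some b => b | none => false) = o.getD false := by cases o <;> rfl

-- the orbit stays in {0..s/2}
lemma orbit_bounds (s x : Int) (hx : 0 ≤ x) (h2 : 2 * x ≤ s) (k : Nat) :
    0 ≤ (fstep s)^[k] x ∧ 2 * (fstep s)^[k] x ≤ s := by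
  induction k with
  | zero => exact ⟨hx, h2⟩
  | succ k ih =>
    rw [Function.iterate_succ_apply']
    have h1 := min_le_left (2 * ((fstep s)^[k] x)) (s - 2 * ((fstep s)^[k] x))
    have h2' := min_le_right (2 * ((fstep s)^[k] x)) (s - 2 * ((fstep s)^[k] x))
    have h3 : fstep s ((fstep s)^[k] x) = 2 * ((fstep s)^[k] x)
        ∨ fstep s ((fstep s)^[k] x) = s - 2 * ((fstep s)^[k] x) := min_choice _ _
    unfold fstep at *
    omega

-- B's counted loop returns false iff the target is reached within the budget
lemma loopAuxB_char (s : Int) : ∀ (n : Nat) (x : Int),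
    loopAuxB n s x = false ↔ ∃ k < n, 2 * (fstep s)^[k] x = s := by
  intro n
  induction n with
  | zero => intro x; simp [loopAuxB]
  | succ n ih =>
    intro x
    by_cases h0 : 2 * x = s
    · rw [loopAuxB, if_pos h0]
      constructor
      · intro _; exact ⟨0, Nat.succ_pos n, h0⟩
      · intro _; rfl
    · rw [loopAuxB, if_neg h0]
      rw [show min (2 * x) (s - 2 * x) = fstep s x from rfl, ih (fstep s x)]
      constructor
      · rintro ⟨k, hk, hh⟩
        exact ⟨k + 1, by omega, by rwa [Function.iterate_succ_apply]⟩
      · rintro ⟨k, hk, hh⟩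
        match k with
        | 0 => exact absurd hh h0
        | Nat.succ k => exact ⟨k, by omega, by rwa [Function.iterate_succ_apply] at hh⟩

-- A's 1D view returns false when the target is first reached at step k (no repeat can precede it)
lemma auxSeen_hits (s : Int) : ∀ (k fuel : Nat) (x : Int) (S : List Int),
    2 * (fstep s)^[k] x = s →
    (∀ i < k, 2 * (fstep s)^[i] x ≠ s) →
    (∀ i < k, (fstep s)^[i] x ∉ S) →
    (∀ i j, i < j → j < k → (fstep s)^[i] x ≠ (fstep s)^[j] x) →
    k < fuel →
    auxSeen fuel s S x = false := by
  intro k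
  induction k with
  | zero =>
    intro fuel x S hhit _ _ _ hfuel
    match fuel with
    | Nat.succ fuel => simp only [auxSeen]; rw [if_pos (by simpa using hhit)]
  | succ k ih =>
    intro fuel x S hhit hmin hS hdist hfuel
    match fuel with
    | Nat.succ fuel =>
      have h0 : ¬(2 * x = s) := by simpa using hmin 0 (Nat.succ_pos k)
      have hx0 : x ∉ S := by simpa using hS 0 (Nat.succ_pos k)
      simp only [auxSeen]
      rw [if_neg h0, if_neg hx0]
      apply ih fuel (fstep s x) (x :: S)
      · rwa [← Function.iterate_succ_apply]
      · intro i hi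
        rw [← Function.iterate_succ_apply]
        exact hmin (i + 1) (by omega)
      · intro i hi
        rw [← Function.iterate_succ_apply]
        intro hmem
        rcases List.mem_cons.mp hmem with h | h
        · exact hdist 0 (i + 1) (by omega) (by omega) h.symm
        · exact hS (i + 1) (by omega) h
      · intro i j hij hj
        rw [← Function.iterate_succ_apply, ← Function.iterate_succ_apply]
        exact hdist (i + 1) (j + 1) (by omega) (by omega)
      · omega

-- A's 1D view returns true when the target is never reached and a repeat (or a seen state) occurs by step j
lemma auxSeen_repeats (s : Int) : ∀ (j fuel : Nat) (x : Int) (S : List Int),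
    j < fuel →
    (∀ k : Nat, 2 * (fstep s)^[k] x ≠ s) →
    ((fstep s)^[j] x ∈ S ∨ ∃ i < j, (fstep s)^[i] x = (fstep s)^[j] x) →
    auxSeen fuel s S x = true := by
  intro j
  induction j with
  | zero =>
    intro fuel x S hfuel hnohit hrep
    match fuel with
    | Nat.succ fuel =>
      have hmem : x ∈ S := by
        rcases hrep with h | ⟨i, hi, _⟩
        · simpa using h
        · omega
      simp only [auxSeen]
      rw [if_neg (by simpa using hnohit 0), if_pos hmem]
  | succ j ih =>
    intro fuel x S hfuel hnohit hrep
    match fuel with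
    | Nat.succ fuel =>
      simp only [auxSeen]
      rw [if_neg (by simpa using hnohit 0)]
      by_cases hmem : x ∈ S
      · rw [if_pos hmem]
      · rw [if_neg hmem]
        apply ih fuel (fstep s x) (x :: S) (by omega)
        · intro k; rw [← Function.iterate_succ_apply]; exact hnohit (k + 1)
        · rw [← Function.iterate_succ_apply]
          rcases hrep with h | ⟨i, hi, hrep⟩
          · exact Or.inl (List.mem_cons_of_mem _ h)
          · match i with
            | 0 => exact Or.inl (by rw [← hrep]; simp)
            | Nat.succ i =>
              refine Or.inr ⟨i, by omega, ?_⟩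
              rw [← Function.iterate_succ_apply]
              exact hrep

-- pigeonhole: the orbit repeats within the first (s/2).toNat + 1 steps
lemma orbit_repeat (s x : Int) (hx : 0 ≤ x) (h2 : 2 * x ≤ s) :
    ∃ i j : Nat, i < j ∧ j ≤ (s / 2).toNat + 1 ∧ (fstep s)^[i] x = (fstep s)^[j] x := by
  have hs : 0 ≤ s := by omega
  have hmaps : ∀ k ∈ Finset.range ((s / 2).toNat + 2),
      (fstep s)^[k] x ∈ Finset.Icc (0 : Int) (s / 2) := by
    intro k _
    have := orbit_bounds s x hx h2 k
    rw [Finset.mem_Icc]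
    omega
  have hcard : (Finset.Icc (0 : Int) (s / 2)).card < (Finset.range ((s / 2).toNat + 2)).card := by
    rw [Int.card_Icc, Finset.card_range]
    omega
  obtain ⟨a, ha, b, hb, hne, heq⟩ :=
    Finset.exists_ne_map_eq_of_card_lt_of_maps_to hcard hmaps
  rw [Finset.mem_range] at ha hb
  rcases Nat.lt_or_ge a b with h | h
  · exact ⟨a, b, h, by omega, heq⟩
  · exact ⟨b, a, by omega, by omega, heq.symm⟩

-- the states before the first hit are pairwise distinct
lemma distinct_before_hit (s x : Int) (k : Nat)
    (hhit : 2 * (fstep s)^[k] x = s)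
    (hmin : ∀ i < k, 2 * (fstep s)^[i] x ≠ s) :
    ∀ i j : Nat, i < j → j ≤ k → (fstep s)^[i] x ≠ (fstep s)^[j] x := by
  intro i j hij hjk heq
  have h1 : (fstep s)^[k - j] ((fstep s)^[j] x) = (fstep s)^[k] x := by
    rw [← Function.iterate_add_apply]
    congr 1
    omega
  have h2 : (fstep s)^[k - j] ((fstep s)^[i] x) = (fstep s)^[k - j + i] x := by
    rw [← Function.iterate_add_apply]
  rw [heq, h1] at h2
  exact hmin (k - j + i) (by omega) (by rw [← h2]; exact hhit)

-- the first hit comes within (s/2).toNat steps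
lemma hit_bound (s x : Int) (hx : 0 ≤ x) (h2 : 2 * x ≤ s) (k : Nat)
    (hhit : 2 * (fstep s)^[k] x = s)
    (hmin : ∀ i < k, 2 * (fstep s)^[i] x ≠ s) :
    k ≤ (s / 2).toNat := by
  have hs : 0 ≤ s := by omega
  by_contra hk
  push_neg at hk
  have hinj : Set.InjOn (fun m => (fstep s)^[m] x) (Finset.range (k + 1)) := by
    intro a ha b hb heq
    simp only [Finset.coe_range, Set.mem_Iio] at ha hb
    by_contra hne
    rcases Nat.lt_or_ge a b with h | h
    · exact distinct_before_hit s x k hhit hmin a b h (by omega) heq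
    · exact distinct_before_hit s x k hhit hmin b a (by omega) (by omega) heq.symm
  have hmaps : ∀ m ∈ Finset.range (k + 1),
      (fstep s)^[m] x ∈ Finset.Icc (0 : Int) (s / 2) := by
    intro m _
    have := orbit_bounds s x hx h2 m
    rw [Finset.mem_Icc]
    omega
  have := Finset.card_le_card_of_injOn _ hmaps hinj
  rw [Int.card_Icc, Finset.card_range] at this
  omega

-- main bridge: A's 1D view with ample fuel equals B's counted loop
lemma main_bridge (s x : Int) (hx : 0 ≤ x) (h2 : 2 * x ≤ s) (fuel : Nat)
    (hfuel : (s / 2).toNat + 2 ≤ fuel) :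
    auxSeen fuel s [] x = loopAuxB ((s / 2).toNat + 2) s x := by
  by_cases hhit : ∃ k : Nat, 2 * (fstep s)^[k] x = s
  · have hk0 := Nat.find_spec hhit
    have hmin : ∀ i < Nat.find hhit, 2 * (fstep s)^[i] x ≠ s :=
      fun i hi => Nat.find_min hhit hi
    have hbound := hit_bound s x hx h2 (Nat.find hhit) hk0 hmin
    have hB : loopAuxB ((s / 2).toNat + 2) s x = false :=
      (loopAuxB_char s _ x).mpr ⟨Nat.find hhit, by omega, hk0⟩
    have hA : auxSeen fuel s [] x = false := by
      apply auxSeen_hits s (Nat.find hhit) fuel x [] hk0 hmin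
      · intro i _; exact List.not_mem_nil
      · intro i j hij hj
        exact distinct_before_hit s x (Nat.find hhit) hk0 hmin i j hij (by omega)
      · omega
    rw [hA, hB]
  · push_neg at hhit
    have hB : loopAuxB ((s / 2).toNat + 2) s x = true := by
      rcases Bool.eq_false_or_eq_true (loopAuxB ((s / 2).toNat + 2) s x) with h | h
      · exact h
      · obtain ⟨k, _, hk⟩ := (loopAuxB_char s _ x).mp h
        exact absurd hk (hhit k)
    obtain ⟨i, j, hij, hj, heq⟩ := orbit_repeat s x hx h2
    have hA : auxSeen fuel s [] x = true :=
      auxSeen_repeats s j fuel x [] (by omega) hhit (Or.inr ⟨i, hij, heq⟩)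
    rw [hA, hB]

-- floordiv bookkeeping for B's budget
lemma budget_eq (s : Int) (hs : 0 ≤ s) :
    (PySem.Int.floordiv s 2 + 2).toNat = (s / 2).toNat + 2 := by
  rw [PySem.Int.floordiv_eq_ediv_of_pos (by omega : (0:Int) < 2)]
  omega

-- ===== VERDICT (by name: the statement is the Claim_ definition above) =====
theorem loop_spec : Claim_equal_loop := by
  intro x y _ hpre
  unfold Spec_loop loop loop_alt
  by_cases hd : x = y
  · subst hd
    simp only [lt_irrefl, if_false]
    simp [loopAuxA]
  · rw [if_neg hd]
    rcases hpre with h | ⟨hx, hy⟩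
    · exact absurd h hd
    · by_cases hxy : x > y
      · simp only [if_pos hxy]
        rw [match_getD]
        have hs : 0 ≤ y + x := by omega
        rw [budget_eq _ hs]
        have hfuel : (((y + x) / 2).toNat + 2) ≤ y.natAbs + x.natAbs + 2 := by omega
        rw [← main_bridge (y + x) y hy (by omega) _ hfuel]
        have := lockstep (y.natAbs + x.natAbs + 2) (y + x) (3 * x) (by omega) y [] hy (by omega)
        simpa using this
      · simp only [if_neg hxy]
        rw [match_getD]
        have hs : 0 ≤ x + y := by omega
        rw [budget_eq _ hs]
        have hfuel : (((x + y) / 2).toNat + 2) ≤ x.natAbs + y.natAbs + 2 := by omega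
        rw [← main_bridge (x + y) x hx (by omega) _ hfuel]
        have := lockstep (x.natAbs + y.natAbs + 2) (x + y) (3 * y) (by omega) x [] hx (by omega)
        simpa using this
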